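-- pv_equiv track=rewrite | github.com/AlanValdevenito/Teoria-de-Algoritmos | PRIMERA-CURSADA/EJERCICIOS/PROGRAMACION-DINAMICA/pd_11.py | operaciones_solucion
-- ===== SOURCE A (Python) =====
-- AUMENTAR_OPERANDO = 'mas1'
--
-- DUPLICAR_OPERANDO = 'por2'
--
-- def operaciones_solucion(mem, k, solucion):
--
--     if (k == 0):
--         return solucion
--
--     if (k % 2 == 0):
--         solucion.append(DUPLICAR_OPERANDO)
--         return operaciones_solucion(mem, k // 2, solucion)
--
--     solucion.append(AUMENTAR_OPERANDO)
--     return operaciones_solucion(mem, k - 1, solucion)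
-- ===== SOURCE B (Python) =====
-- AUMENTAR_OPERANDO = 'mas1'
--
-- DUPLICAR_OPERANDO = 'por2'
--
-- def operaciones_solucion(mem, k, solucion):
--     # Read k's binary digits directly: every bit below the MSB yields
--     # (optionally 'mas1' then) 'por2', LSB first; the MSB yields the final 'mas1'.
--     if k:
--         for b in bin(k)[3:][::-1]:
--             if b == '1':
--                 solucion.append(AUMENTAR_OPERANDO)
--             solucion.append(DUPLICAR_OPERANDO)
--         solucion.append(AUMENTAR_OPERANDO)
--     return solucion
-- ===== Notes on version B (the rewrite author's own statement) =====
-- stated objective: alternative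
-- what changed: B replaces A's per-step recursion on the recurrence (halve when even, decrement when odd) by a single pass over k's binary representation (bin(k)), emitting 'mas1'/'por2' from the bits LSB-first; A diverges on negative k, which Pre_ excludes.
import Mathlib
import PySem

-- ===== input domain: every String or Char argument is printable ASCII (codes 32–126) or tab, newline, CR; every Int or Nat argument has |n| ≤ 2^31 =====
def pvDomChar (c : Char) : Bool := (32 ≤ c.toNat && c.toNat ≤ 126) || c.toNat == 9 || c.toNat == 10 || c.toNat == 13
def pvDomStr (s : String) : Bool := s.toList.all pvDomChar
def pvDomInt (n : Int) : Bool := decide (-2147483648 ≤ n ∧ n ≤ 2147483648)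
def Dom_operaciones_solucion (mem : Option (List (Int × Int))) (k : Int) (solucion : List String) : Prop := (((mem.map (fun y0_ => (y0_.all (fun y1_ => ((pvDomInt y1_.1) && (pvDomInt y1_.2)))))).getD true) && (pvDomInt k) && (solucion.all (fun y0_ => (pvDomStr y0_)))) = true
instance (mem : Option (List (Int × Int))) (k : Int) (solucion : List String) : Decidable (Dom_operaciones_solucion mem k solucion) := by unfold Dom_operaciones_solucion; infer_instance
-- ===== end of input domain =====

-- B reads k's binary digits in one pass instead of A's per-step recursion; both
-- mutate `solucion` in place in Python in the same way (the equivalence proved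
-- here is about the return value). A diverges for k < 0; Pre_ excludes that.

-- ===== PORT A =====
-- fuel makes A's (tail) recursion total in Lean; under Pre_ (0 ≤ k) the fuel
-- k.toNat + 1 is never exhausted, so this is A's computation step for step.
def operaciones_solucion_go (mem : Option (List (Int × Int))) : Nat → Int → List String → List String
  | 0, _, sol => sol
  | fuel + 1, k, sol =>
    if k = 0 then sol
    else if PySem.Int.mod k 2 = 0 then
      operaciones_solucion_go mem fuel (PySem.Int.floordiv k 2) (sol ++ ["por2"])
    else
      operaciones_solucion_go mem fuel (k - 1) (sol ++ ["mas1"])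

def operaciones_solucion (mem : Option (List (Int × Int))) (k : Int) (solucion : List String) : List String :=
  operaciones_solucion_go mem (k.toNat + 1) k solucion

-- ===== PORT B =====
-- Python's bin(n) digit string (without the '0b'/'-0b' prefix) for a Nat.
def natBits (n : Nat) : List Char :=
  if n < 2 then [if n = 1 then '1' else '0']
  else natBits (n / 2) ++ [if n % 2 = 1 then '1' else '0']
termination_by n
decreasing_by omega

-- Python's bin(k) as a list of characters.
def pyBin (k : Int) : List Char :=
  if k < 0 then '-' :: '0' :: 'b' :: natBits k.natAbs
  else '0' :: 'b' :: natBits k.toNat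

def operaciones_solucion_alt (mem : Option (List (Int × Int))) (k : Int) (solucion : List String) : List String :=
  if k ≠ 0 then
    (((pyBin k).drop 3).reverse.foldl
      (fun acc c => if c = '1' then acc ++ ["mas1", "por2"] else acc ++ ["por2"]) solucion)
      ++ ["mas1"]
  else solucion

-- ===== PRECONDITION & SPEC =====
-- Pre_ excludes k < 0, on which Python A never returns (infinite recursion).
def Pre_operaciones_solucion (mem : Option (List (Int × Int))) (k : Int) (solucion : List String) : Prop := 0 ≤ k
instance (mem : Option (List (Int × Int))) (k : Int) (solucion : List String) : Decidable (Pre_operaciones_solucion mem k solucion) := by unfold Pre_operaciones_solucion; infer_instance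
def pvWitness_operaciones_solucion : (Option (List (Int × Int))) × Int × List String := (none, 6, ["x"])

def Spec_operaciones_solucion (mem : Option (List (Int × Int))) (k : Int) (solucion : List String) (out : List String) : Prop := out = operaciones_solucion_alt mem k solucion
instance (mem : Option (List (Int × Int))) (k : Int) (solucion : List String) (out : List String) : Decidable (Spec_operaciones_solucion mem k solucion out) := by unfold Spec_operaciones_solucion; infer_instance

-- ===== CLAIM (what is proved, stated in full; the proofs are below) =====
def Claim_equal_operaciones_solucion : Prop := ∀ (mem : Option (List (Int × Int))) (k : Int) (solucion : List String), Dom_operaciones_solucion mem k solucion → Pre_operaciones_solucion mem k solucion → Spec_operaciones_solucion mem k solucion (operaciones_solucion mem k solucion)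

-- ===== LEMMAS AND PROOFS =====

-- the common operation sequence, as a function of k
def opSeq : Nat → List String
  | 0 => []
  | n + 1 =>
    if (n + 1) % 2 = 0 then "por2" :: opSeq ((n + 1) / 2)
    else "mas1" :: opSeq n
termination_by n => n
decreasing_by all_goals omega

lemma opSeq_pos (n : Nat) (h : 0 < n) :
    opSeq n = if n % 2 = 0 then "por2" :: opSeq (n / 2) else "mas1" :: opSeq (n - 1) := by
  cases n with
  | zero => omega
  | succ m => rw [opSeq]; rfl

lemma goA_eq (mem : Option (List (Int × Int))) (fuel : Nat) :
    ∀ (k : Int) (sol : List String), 0 ≤ k → k < fuel →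
      operaciones_solucion_go mem fuel k sol = sol ++ opSeq k.toNat := by
  induction fuel with
  | zero => intro k sol h1 h2; omega
  | succ f ih =>
    intro k sol h1 h2
    rw [operaciones_solucion_go]
    by_cases hk : k = 0
    · simp [hk, opSeq]
    · have hkpos : 0 < k := by omega
      rw [if_neg hk]
      rw [PySem.Int.mod_eq_emod_of_pos (a := k) (by omega),
          PySem.Int.floordiv_eq_ediv_of_pos (a := k) (by omega)]
      by_cases he : k % 2 = 0
      · rw [if_pos he, ih (k / 2) _ (by omega) (by omega)]
        rw [opSeq_pos k.toNat (by omega), if_pos (by omega)]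
        have : (k / 2).toNat = k.toNat / 2 := by omega
        simp [this]
      · rw [if_neg he, ih (k - 1) _ (by omega) (by omega)]
        rw [opSeq_pos k.toNat (by omega), if_neg (by omega)]
        have : (k - 1).toNat = k.toNat - 1 := by omega
        simp [this]

lemma natBits_ne_nil (n : Nat) : natBits n ≠ [] := by
  rw [natBits]
  split <;> simp

lemma natBits_ge2 (n : Nat) (h : 2 ≤ n) :
    natBits n = natBits (n / 2) ++ [if n % 2 = 1 then '1' else '0'] := by
  rw [natBits, if_neg (by omega)]

lemma foldB_eq (n : Nat) (h : 1 ≤ n) : ∀ (sol : List String),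
    (((natBits n).drop 1).reverse.foldl
      (fun acc c => if c = '1' then acc ++ ["mas1", "por2"] else acc ++ ["por2"]) sol)
      ++ ["mas1"] = sol ++ opSeq n := by
  induction n using Nat.strong_induction_on with
  | _ n ih =>
    intro sol
    by_cases hs : n < 2
    · have : n = 1 := by omega
      subst this
      simp [natBits, opSeq]
    · have h2 : 2 ≤ n := by omega
      rw [natBits_ge2 n h2]
      have hne := natBits_ne_nil (n / 2)
      have hlen : 1 ≤ (natBits (n / 2)).length := by
        cases hx : natBits (n / 2) with
        | nil => exact absurd hx hne
        | cons a l => simp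
      rw [List.drop_append_of_le_length hlen, List.reverse_append]
      simp only [List.reverse_cons, List.reverse_nil, List.nil_append, List.singleton_append,
        List.foldl_cons]
      by_cases he : n % 2 = 1
      · rw [if_pos he, if_pos rfl,
            ih (n / 2) (by omega) (by omega) (sol ++ ["mas1", "por2"])]
        rw [opSeq_pos n (by omega), if_neg (by omega),
            opSeq_pos (n - 1) (by omega), if_pos (by omega)]
        have : (n - 1) / 2 = n / 2 := by omega
        simp [this]
      · rw [if_neg he, if_neg (by simp), ih (n / 2) (by omega) (by omega) (sol ++ ["por2"])]
        rw [opSeq_pos n (by omega), if_pos (by omega)]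
        simp

lemma alt_eq (mem : Option (List (Int × Int))) (k : Int) (sol : List String) (h : 0 ≤ k) :
    operaciones_solucion_alt mem k sol = sol ++ opSeq k.toNat := by
  unfold operaciones_solucion_alt
  by_cases hk : k = 0
  · simp [hk, opSeq]
  · rw [if_pos hk]
    unfold pyBin
    rw [if_neg (by omega)]
    have : ('0' :: 'b' :: natBits k.toNat).drop 3 = (natBits k.toNat).drop 1 := rfl
    rw [this, foldB_eq k.toNat (by omega) sol]

-- ===== VERDICT (by name: the statement is the Claim_ definition above) =====
theorem operaciones_solucion_spec : Claim_equal_operaciones_solucion := by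
  intro mem k sol _ hpre
  unfold Spec_operaciones_solucion operaciones_solucion
  rw [goA_eq mem (k.toNat + 1) k sol hpre (by omega), alt_eq mem k sol hpre]
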